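-- pv_equiv track=rewrite | github.com/qpollig/Algorithmic-tasks | fibonacci_barometer.py | amount_of_change
-- ===== SOURCE A (Python) =====
-- def amount_of_change(generations):
--     if generations == 0:
--         return 1
--     elif generations == 1:
--         return 1
--     elif generations == 2:
--         return 2
--     else:
--         summ = amount_of_change(generations - 1) + amount_of_change(generations - 2)
--     return summ
-- ===== SOURCE B (Python) =====
-- def amount_of_change(generations):
--     a, b = 1, 1
--     for _ in range(generations - 1):
--         a, b = b, a + b
--     return b
-- ===== Notes on version B (the rewrite author's own statement) =====
-- stated objective: faster
-- what changed: Replaces the naive exponential double recursion with a single iterative loop keeping the last two values.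
import Mathlib
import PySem

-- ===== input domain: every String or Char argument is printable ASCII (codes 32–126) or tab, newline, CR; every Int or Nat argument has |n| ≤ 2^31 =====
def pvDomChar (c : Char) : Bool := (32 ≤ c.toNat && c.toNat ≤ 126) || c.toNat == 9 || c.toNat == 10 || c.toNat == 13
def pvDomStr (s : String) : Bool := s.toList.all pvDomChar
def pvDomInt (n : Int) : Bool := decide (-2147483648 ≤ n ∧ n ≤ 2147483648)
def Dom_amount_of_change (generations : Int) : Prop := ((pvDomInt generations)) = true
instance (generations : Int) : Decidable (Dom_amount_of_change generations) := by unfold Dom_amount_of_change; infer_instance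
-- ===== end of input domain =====

-- B replaces A's exponential double recursion with a single iterative loop over the last two values (asymptotically faster).


-- ===== PORT A =====
-- A recurses on the Int argument; on the admitted domain (generations ≥ 0) this is
-- exactly structural recursion on generations.toNat.
def amountRecA : Nat → Int
  | 0 => 1
  | 1 => 1
  | 2 => 2
  | n + 3 => amountRecA (n + 2) + amountRecA (n + 1)

def amount_of_change (generations : Int) : Int := amountRecA generations.toNat

-- ===== PORT B =====
def amount_of_change_alt (generations : Int) : Int :=
  ((PySem.List.pyRange 0 (generations - 1) 1).foldl
    (fun (st : Int × Int) _ => (st.2, st.1 + st.2)) (1, 1)).2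

-- ===== PRECONDITION & SPEC =====
-- Pre_ excludes negative generations, on which A's recursion never reaches a base case (RecursionError).
def Pre_amount_of_change (generations : Int) : Prop := 0 ≤ generations
instance (generations : Int) : Decidable (Pre_amount_of_change generations) := by unfold Pre_amount_of_change; infer_instance
def pvWitness_amount_of_change : Int := 5

def Spec_amount_of_change (generations : Int) (out : Int) : Prop := out = amount_of_change_alt generations
instance (generations : Int) (out : Int) : Decidable (Spec_amount_of_change generations out) := by unfold Spec_amount_of_change; infer_instance

-- ===== CLAIM (what is proved, stated in full; the proofs are below) =====
def Claim_equal_amount_of_change : Prop := ∀ (generations : Int), Dom_amount_of_change generations → Pre_amount_of_change generations → Spec_amount_of_change generations (amount_of_change generations)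

-- ===== LEMMAS AND PROOFS =====
theorem amountRecA_add2 (n : Nat) : amountRecA (n + 2) = amountRecA n + amountRecA (n + 1) := by
  cases n with
  | zero => simp [amountRecA]
  | succ m =>
    cases m with
    | zero => simp [amountRecA]
    | succ k => simp [amountRecA]; ring

theorem foldl_range_pair (n : Nat) :
    (List.range n).foldl (fun (st : Int × Int) (_ : Nat) => (st.2, st.1 + st.2)) (1, 1)
      = (amountRecA n, amountRecA (n + 1)) := by
  induction n with
  | zero => simp [amountRecA]
  | succ m ih =>
    rw [List.range_succ, List.foldl_append, ih]
    simp [amountRecA_add2]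

theorem alt_eq (g : Int) :
    amount_of_change_alt g = amountRecA ((g - 1).toNat + 1) := by
  unfold amount_of_change_alt
  rw [PySem.List.pyRange_one]
  rw [List.foldl_map]
  rw [show (g - 1 - 0).toNat = (g - 1).toNat by omega]
  rw [foldl_range_pair]

-- ===== VERDICT (by name: the statement is the Claim_ definition above) =====
theorem amount_of_change_spec : Claim_equal_amount_of_change := by
  intro g _ hpre
  unfold Spec_amount_of_change amount_of_change
  rw [alt_eq]
  rcases eq_or_lt_of_le hpre with h | h
  · simp [← h, amountRecA]
  · congr 1; omega
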